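-- pv_equiv track=rewrite | github.com/collin90/Wheeler-Graph-Application | algorithms/graph_from_vectors.py | incomingDict
-- ===== SOURCE A (Python) =====
-- def incomingDict(I):
--     inie = {}
--     curr = 0
--     inie[0] = 0
--     for i in I:
--         if i == '1':
--             curr = curr + 1
--             inie[curr] = 0
--         else:
--             inie[curr] = inie[curr] + 1
--     return inie
-- ===== SOURCE B (Python) =====
-- # B: index the '1' positions once, then each count is a gap between consecutive
-- # bounds computed by subtraction (build-index-then-diff instead of a running dict).
-- def incomingDict(I):
--     L = list(I)
--     ones = [i for i, x in enumerate(L) if x == '1']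
--     bounds = [-1] + ones + [len(L)]
--     return {k: b - a - 1 for k, (a, b) in enumerate(zip(bounds, bounds[1:]))}
-- ===== Notes on version B (the rewrite author's own statement) =====
-- stated objective: alternative
-- what changed: B replaces A's single pass with a running dict increment by materializing the list, building the index list of one-positions once, padding it with sentinel bounds, and producing each count as the difference of consecutive bounds.
import Mathlib
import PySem

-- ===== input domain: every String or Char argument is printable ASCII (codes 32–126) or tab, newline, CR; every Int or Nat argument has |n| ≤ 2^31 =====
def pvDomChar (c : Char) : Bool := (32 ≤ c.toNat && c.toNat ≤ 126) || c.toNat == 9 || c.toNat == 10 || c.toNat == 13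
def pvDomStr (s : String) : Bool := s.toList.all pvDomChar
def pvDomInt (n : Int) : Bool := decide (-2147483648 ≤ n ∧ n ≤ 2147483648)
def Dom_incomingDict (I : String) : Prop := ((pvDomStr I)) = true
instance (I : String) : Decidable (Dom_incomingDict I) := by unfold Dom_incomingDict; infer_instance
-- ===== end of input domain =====

-- B builds the index list of one-positions once and returns each count as a gap
-- between consecutive padded bounds, instead of A's running-dict increment pass
-- (objective: alternative decomposition; same asymptotic cost).

-- ===== PORT A =====
def incomingDict (I : String) : List (Int × Int) :=
  let init : PySem.Dict Int Int := (PySem.Dict.empty).insert 0 0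
  (I.toList.foldl (fun (st : PySem.Dict Int Int × Int) i =>
      if i == '1' then
        (st.1.insert (st.2 + 1) 0, st.2 + 1)
      else
        -- inie[curr]: the key curr is always present here, so getD is exact
        (st.1.insert st.2 (st.1.getD st.2 0 + 1), st.2)) (init, 0)).1.items

-- ===== PORT B =====
def incomingDict_alt (I : String) : List (Int × Int) :=
  let L := I.toList
  let ones : List Int := (PySem.List.enumerate L 0).filterMap
      (fun p => if p.2 == '1' then some p.1 else none)
  let bounds : List Int := [-1] ++ ones ++ [(L.length : Int)]
  -- dict comprehension over distinct keys k = 0,1,…: items in that order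
  (PySem.List.enumerate (bounds.zip (PySem.List.slice bounds (some 1) none)) 0).map
      (fun p => (p.1, p.2.2 - p.2.1 - 1))

-- ===== PRECONDITION & SPEC =====
def Spec_incomingDict (I : String) (out : List (Int × Int)) : Prop := out = incomingDict_alt I
instance (I : String) (out : List (Int × Int)) : Decidable (Spec_incomingDict I out) := by unfold Spec_incomingDict; infer_instance

-- ===== CLAIM (what is proved, stated in full; the proofs are below) =====
def Claim_equal_incomingDict : Prop := ∀ (I : String), Dom_incomingDict I → Spec_incomingDict I (incomingDict I)

-- ===== LEMMAS AND PROOFS =====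

-- segment lengths: counts of non-'1' characters between the '1's (never empty)
def segs : List Char → List Int
  | [] => [0]
  | c :: t =>
    if c = '1' then 0 :: segs t
    else
      match segs t with
      | h :: r => (h + 1) :: r
      | [] => []

theorem segs_ne_nil (t : List Char) : segs t ≠ [] := by
  induction t with
  | nil => simp [segs]
  | cons c t ih =>
    by_cases hc : c = '1'
    · simp [segs, hc]
    · cases h : segs t with
      | nil => exact absurd h ih
      | cons a r => simp [segs, hc, h]

theorem segs_cons_one (t : List Char) : segs ('1' :: t) = 0 :: segs t := by
  simp [segs]

theorem segs_cons_other {c : Char} (hc : c ≠ '1') (t : List Char) {h : Int} {r : List Int}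
    (ht : segs t = h :: r) : segs (c :: t) = (h + 1) :: r := by
  simp [segs, hc, ht]

-- positions of '1' in t when numbering starts at s
def onesFrom (s : Int) : List Char → List Int
  | [] => []
  | c :: t => if c = '1' then s :: onesFrom (s + 1) t else onesFrom (s + 1) t

theorem onesFrom_eq_filterMap (t : List Char) (s : Int) :
    (PySem.List.enumerate t s).filterMap (fun p => if p.2 == '1' then some p.1 else none)
      = onesFrom s t := by
  induction t generalizing s with
  | nil => simp [PySem.List.enumerate_nil, onesFrom]
  | cons c t ih =>
    simp only [PySem.List.enumerate_cons, List.filterMap_cons, onesFrom]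
    by_cases h : c = '1' <;> simpa [h] using ih (s + 1)

-- ---- A side ----

-- inserting a key absent from the items list appends
theorem insert_fresh {l : List (Int × Int)} {k w : Int}
    (h : ∀ p ∈ l, p.1 ≠ k) :
    (PySem.Dict.mk l).insert k w = PySem.Dict.mk (l ++ [(k, w)]) := by
  apply PySem.Dict.ext
  rw [PySem.Dict.items_insert_of_not_contains]
  rw [PySem.Dict.contains_eq_decide_mem_keys]
  simp only [PySem.Dict.keys, decide_eq_false_iff_not]
  intro hm
  obtain ⟨p, hp, hpk⟩ := List.mem_map.mp hm
  exact h p hp hpk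

-- overwriting the last key leaves every other item untouched
theorem insert_last {done : List (Int × Int)} {curr v w : Int}
    (h : ∀ p ∈ done, p.1 ≠ curr) :
    (PySem.Dict.mk (done ++ [(curr, v)])).insert curr w
      = PySem.Dict.mk (done ++ [(curr, w)]) := by
  apply PySem.Dict.ext
  rw [PySem.Dict.items_insert_of_contains]
  · show (done ++ [(curr, v)]).map (fun p => if p.1 == curr then (curr, w) else p)
        = done ++ [(curr, w)]
    rw [List.map_append]
    congr 1
    · calc done.map (fun p => if p.1 == curr then ((curr : Int), w) else p)
          = done.map id := List.map_congr_left (fun p hp => by simp [h p hp])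
        _ = done := List.map_id done
    · simp
  · rw [PySem.Dict.contains_eq_decide_mem_keys]
    simp [PySem.Dict.keys]

theorem getD_last {done : List (Int × Int)} {curr v : Int}
    (h : ∀ p ∈ done, p.1 ≠ curr) :
    (PySem.Dict.mk (done ++ [(curr, v)])).getD curr 0 = v := by
  induction done with
  | nil =>
    simp [PySem.Dict.getD_eq_get?_getD, PySem.Dict.get?_mk_cons]
  | cons p done ih =>
    have hp : p.1 ≠ curr := h p (by simp)
    rw [PySem.Dict.getD_eq_get?_getD] at *
    rw [List.cons_append, show PySem.Dict.mk (p :: (done ++ [(curr, v)]))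
        = PySem.Dict.mk ((p.1, p.2) :: (done ++ [(curr, v)])) by rfl,
      PySem.Dict.get?_mk_cons]
    rw [if_neg (by simpa using hp)]
    exact ih (fun q hq => h q (by simp [hq]))

def stepA (st : PySem.Dict Int Int × Int) (i : Char) : PySem.Dict Int Int × Int :=
  if i == '1' then (st.1.insert (st.2 + 1) 0, st.2 + 1)
  else (st.1.insert st.2 (st.1.getD st.2 0 + 1), st.2)

def bump (v : Int) : List (Int × Int) → List (Int × Int)
  | (k, h) :: r => (k, v + h) :: r
  | [] => []

theorem bump_zero (l : List (Int × Int)) : bump 0 l = l := by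
  cases l with
  | nil => rfl
  | cons p r => cases p; simp [bump]

theorem loopA_items (cs : List Char) :
    ∀ (done : List (Int × Int)) (curr v : Int),
    (∀ p ∈ done, p.1 < curr) →
    (cs.foldl stepA (PySem.Dict.mk (done ++ [(curr, v)]), curr)).1.items
      = done ++ bump v (PySem.List.enumerate (segs cs) curr) := by
  induction cs with
  | nil =>
    intro done curr v _
    simp [segs, PySem.List.enumerate_cons, PySem.List.enumerate_nil, bump]
  | cons c t ih =>
    intro done curr v hlt
    have hne : ∀ p ∈ done, p.1 ≠ curr := fun p hp => ne_of_lt (hlt p hp)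
    by_cases hc : c = '1'
    · have hstep : stepA (PySem.Dict.mk (done ++ [(curr, v)]), curr) c
          = (PySem.Dict.mk ((done ++ [(curr, v)]) ++ [(curr + 1, 0)]), curr + 1) := by
        unfold stepA
        rw [if_pos (by simp [hc])]
        congr 1
        apply insert_fresh
        intro p hp
        rcases List.mem_append.mp hp with h1 | h1
        · have := hlt p h1; omega
        · simp only [List.mem_singleton] at h1; subst h1; show curr ≠ curr + 1; omega
      rw [List.foldl_cons, hstep,
          ih (done ++ [(curr, v)]) (curr + 1) 0
            (by intro p hp
                rcases List.mem_append.mp hp with h1 | h1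
                · have := hlt p h1; omega
                · simp only [List.mem_singleton] at h1; subst h1
                  show curr < curr + 1; omega)]
      rw [bump_zero, hc, segs_cons_one, PySem.List.enumerate_cons]
      simp [bump]
    · have hstep : stepA (PySem.Dict.mk (done ++ [(curr, v)]), curr) c
          = (PySem.Dict.mk (done ++ [(curr, v + 1)]), curr) := by
        unfold stepA
        rw [if_neg (by simp [hc])]
        rw [getD_last hne, insert_last hne]
      rw [List.foldl_cons, hstep, ih done curr (v + 1) hlt]
      obtain ⟨h, r, hsegs⟩ : ∃ h r, segs t = h :: r := by
        cases hs : segs t with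
        | nil => exact absurd hs (segs_ne_nil t)
        | cons a r => exact ⟨a, r, rfl⟩
      rw [hsegs, segs_cons_other hc t hsegs,
          PySem.List.enumerate_cons, PySem.List.enumerate_cons]
      simp [bump]
      ring

theorem A_eq_enumerate_segs (I : String) :
    incomingDict I = PySem.List.enumerate (segs I.toList) 0 := by
  have h0 : (PySem.Dict.empty : PySem.Dict Int Int).insert 0 0
      = PySem.Dict.mk ([] ++ [((0 : Int), (0 : Int))]) := by
    apply PySem.Dict.ext; rfl
  unfold incomingDict
  simp only [h0]
  have hfun : (fun (st : PySem.Dict Int Int × Int) i =>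
      if i == '1' then (st.1.insert (st.2 + 1) 0, st.2 + 1)
      else (st.1.insert st.2 (st.1.getD st.2 0 + 1), st.2)) = stepA := rfl
  rw [hfun, loopA_items I.toList [] 0 0 (by simp), bump_zero, List.nil_append]

-- ---- B side ----

theorem B_gaps (t : List Char) :
    ∀ (s j : Int),
    (PySem.List.enumerate
        (((s - 1) :: (onesFrom s t ++ [s + (t.length : Int)])).zip
          (onesFrom s t ++ [s + (t.length : Int)])) j).map
      (fun p => (p.1, p.2.2 - p.2.1 - 1))
      = PySem.List.enumerate (segs t) j := by
  induction t with
  | nil =>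
    intro s j
    simp [onesFrom, segs, PySem.List.enumerate_cons, PySem.List.enumerate_nil]
  | cons c t ih =>
    intro s j
    have hlen : s + (((c :: t).length : Nat) : Int) = (s + 1) + (t.length : Int) := by
      simp; ring
    rw [show onesFrom s (c :: t)
        = if c = '1' then s :: onesFrom (s + 1) t else onesFrom (s + 1) t from rfl, hlen]
    by_cases hc : c = '1'
    · rw [if_pos hc, List.cons_append, List.zip_cons_cons,
          PySem.List.enumerate_cons, List.map_cons]
      have ih' := ih (s + 1) (j + 1)
      rw [show s + 1 - 1 = s by ring] at ih'
      rw [ih', hc, segs_cons_one, PySem.List.enumerate_cons]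
      simp
    · rw [if_neg hc]
      obtain ⟨x, X, hX⟩ : ∃ x X,
          onesFrom (s + 1) t ++ [(s + 1) + (t.length : Int)] = x :: X := by
        cases h : onesFrom (s + 1) t with
        | nil => exact ⟨(s + 1) + (t.length : Int), [], by simp [h]⟩
        | cons a r => exact ⟨a, r ++ [(s + 1) + (t.length : Int)], by simp [h]⟩
      have ih' := ih (s + 1) j
      rw [show s + 1 - 1 = s by ring] at ih'
      rw [hX] at ih' ⊢
      rw [List.zip_cons_cons, PySem.List.enumerate_cons, List.map_cons] at ih' ⊢
      obtain ⟨h, r, hsegs⟩ : ∃ h r, segs t = h :: r := by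
        cases hs : segs t with
        | nil => exact absurd hs (segs_ne_nil t)
        | cons a r => exact ⟨a, r, rfl⟩
      rw [hsegs, PySem.List.enumerate_cons] at ih'
      rw [segs_cons_other hc t hsegs, PySem.List.enumerate_cons]
      rw [List.cons_eq_cons] at ih'
      obtain ⟨h1, h2⟩ := ih'
      rw [List.cons_eq_cons]
      refine ⟨?_, h2⟩
      have hx : x - s - 1 = h := by simpa using congrArg Prod.snd h1
      simp [← hx]
      ring

theorem B_eq_enumerate_segs (I : String) :
    incomingDict_alt I = PySem.List.enumerate (segs I.toList) 0 := by
  unfold incomingDict_alt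
  simp only [onesFrom_eq_filterMap, PySem.List.slice_from_one]
  have := B_gaps I.toList 0 0
  rw [show (0 : Int) - 1 = -1 by ring] at this
  simpa using this

-- ===== VERDICT (by name: the statement is the Claim_ definition above) =====
theorem incomingDict_spec : Claim_equal_incomingDict := by
  intro I _
  unfold Spec_incomingDict
  rw [A_eq_enumerate_segs, B_eq_enumerate_segs]
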